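-- pv_equiv track=rewrite | github.com/kunalm10/Leetcode_practice | Defanging_an_IP_address.py | defanging_an_address
-- ===== SOURCE A (Python) =====
-- def defanging_an_address(address):
--     return_string = str()
--     for char in address:
--         if char == ".":
--             return_string += "[.]"
--         else:
--             return_string += char
--     return return_string
-- ===== SOURCE B (Python) =====
-- def defanging_an_address(address):
--     return "[.]".join(address.split("."))
-- ===== Notes on version B (the rewrite author's own statement) =====
-- stated objective: faster
-- what changed: Replaces the character-by-character scan with branching string appends by a single split on the dot separator followed by one join with the bracketed separator.
import Mathlib
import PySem

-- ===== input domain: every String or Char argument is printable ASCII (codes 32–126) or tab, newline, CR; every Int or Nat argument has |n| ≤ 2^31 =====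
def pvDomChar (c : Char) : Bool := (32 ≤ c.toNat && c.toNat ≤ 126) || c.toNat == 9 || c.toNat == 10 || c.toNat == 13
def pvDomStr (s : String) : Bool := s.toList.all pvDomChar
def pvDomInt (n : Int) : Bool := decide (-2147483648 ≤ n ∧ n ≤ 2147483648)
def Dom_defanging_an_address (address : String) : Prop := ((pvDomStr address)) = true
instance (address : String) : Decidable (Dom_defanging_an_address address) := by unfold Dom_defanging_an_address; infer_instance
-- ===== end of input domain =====

-- B replaces A's character-by-character scan with split-on-'.' then join-with-"[.]" (idiomatic decomposition; same result).

-- ===== PORT A =====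
-- A: scan each character, appending "[.]" for '.' and the character itself otherwise.
def defanging_an_address (address : String) : String :=
  String.ofList
    (address.toList.foldl
      (fun acc c => acc ++ (if c = '.' then ['[', '.', ']'] else [c])) [])

-- ===== PORT B =====
-- B: address.split('.') then "[.]".join(...).  split? is always `some` here since the
-- separator "." is nonempty, so getD [] never supplies its default.
def defanging_an_address_alt (address : String) : String :=
  PySem.Str.join "[.]" ((PySem.Str.split? address ".").getD [])

-- ===== PRECONDITION & SPEC =====
def Spec_defanging_an_address (address : String) (out : String) : Prop := out = defanging_an_address_alt address
instance (address : String) (out : String) : Decidable (Spec_defanging_an_address address out) := by unfold Spec_defanging_an_address; infer_instance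

-- ===== CLAIM (what is proved, stated in full; the proofs are below) =====
def Claim_equal_defanging_an_address : Prop := ∀ (address : String), Dom_defanging_an_address address → Spec_defanging_an_address address (defanging_an_address address)

-- ===== LEMMAS AND PROOFS =====

-- the per-character expansion A performs
def pvDefangChar (c : Char) : List Char := if c = '.' then ['[', '.', ']'] else [c]

-- splitOn.go never returns the empty list of segments
theorem pvGo_ne_nil (fuel : Nat) (l cur : List Char) (acc : List (List Char)) :
    PySem.Chars.splitOn.go ['.'] fuel l cur acc ≠ [] := by
  induction fuel generalizing l cur acc with
  | zero => simp [PySem.Chars.splitOn.go]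
  | succ n ih =>
    cases l with
    | nil => simp [PySem.Chars.splitOn.go]
    | cons c rest =>
      simp only [PySem.Chars.splitOn.go, List.isPrefixOf]
      by_cases h : ('.' == c) = true
      · simp only [h, Bool.true_and, if_true]
        exact ih _ _ _
      · simp only [eq_false_of_ne_true h, Bool.false_and, Bool.false_eq_true, if_false]
        exact ih _ _ _

-- splitOn.go's accumulator can be spliced out
theorem pvGo_acc (fuel : Nat) (l cur : List Char) (acc : List (List Char)) :
    PySem.Chars.splitOn.go ['.'] fuel l cur acc
      = acc.reverse ++ PySem.Chars.splitOn.go ['.'] fuel l cur [] := by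
  induction fuel generalizing l cur acc with
  | zero => simp [PySem.Chars.splitOn.go]
  | succ n ih =>
    cases l with
    | nil => simp [PySem.Chars.splitOn.go]
    | cons c rest =>
      simp only [PySem.Chars.splitOn.go, List.isPrefixOf]
      by_cases h : ('.' == c) = true
      · simp only [h, Bool.true_and, if_true, List.length_cons,
          List.length_nil, List.drop_succ_cons, List.drop_zero]
        rw [ih rest [] (cur.reverse :: acc), ih rest [] [cur.reverse]]
        rw [List.reverse_cons, List.reverse_singleton, List.append_assoc]
      · simp only [eq_false_of_ne_true h, Bool.false_and, Bool.false_eq_true, if_false]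
        rw [ih rest (c :: cur) acc]

-- joining splitOn.go's segments with "[.]" yields cur.reverse followed by the defanged rest
theorem pvGo_join (fuel : Nat) (l cur : List Char) (h : l.length < fuel) :
    PySem.Chars.join ['[', '.', ']'] (PySem.Chars.splitOn.go ['.'] fuel l cur [])
      = cur.reverse ++ l.flatMap pvDefangChar := by
  induction fuel generalizing l cur with
  | zero => omega
  | succ n ih =>
    cases l with
    | nil => simp [PySem.Chars.splitOn.go, PySem.Chars.join_singleton]
    | cons c rest =>
      have hrest : rest.length < n := by simpa using h
      simp only [PySem.Chars.splitOn.go, List.isPrefixOf]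
      by_cases hc : c = '.'
      · subst hc
        simp only [BEq.rfl, Bool.true_and, if_true, List.length_cons,
          List.length_nil, List.drop_succ_cons, List.drop_zero]
        rw [pvGo_acc n rest [] [cur.reverse]]
        cases htail : PySem.Chars.splitOn.go ['.'] n rest [] [] with
        | nil => exact absurd htail (pvGo_ne_nil n rest [] [])
        | cons p ps =>
          simp only [List.reverse_singleton, List.singleton_append]
          rw [PySem.Chars.join_cons_cons]
          have hres := ih rest [] hrest
          rw [htail] at hres
          simp only [List.reverse_nil, List.nil_append] at hres
          rw [hres]
          simp [pvDefangChar]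
      · have hb : ('.' == c) = false := beq_eq_false_iff_ne.mpr (Ne.symm hc)
        simp only [hb, Bool.false_and, Bool.false_eq_true, if_false]
        rw [ih rest (c :: cur) hrest]
        simp [pvDefangChar, hc]

-- ===== VERDICT (by name: the statement is the Claim_ definition above) =====
theorem defanging_an_address_spec : Claim_equal_defanging_an_address := by
  intro address _
  unfold Spec_defanging_an_address defanging_an_address defanging_an_address_alt
  have hfold : List.foldl (fun acc c => acc ++ if c = '.' then ['[', '.', ']'] else [c]) ([] : List Char) address.toList
      = address.toList.flatMap pvDefangChar := by
    simpa [pvDefangChar] using PySem.List.foldl_append_eq_flatMap pvDefangChar address.toList []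
  rw [hfold]
  have h1 : ".".toList = ['.'] := rfl
  have h2 : "[.]".toList = ['[', '.', ']'] := rfl
  simp only [PySem.Str.split?, PySem.Chars.split?, PySem.Str.join, PySem.Chars.splitOn, h1, h2,
    List.isEmpty_cons, Bool.false_eq_true, if_false, Option.map_some, Option.getD_some,
    List.map_map]
  have h3 : ∀ (parts : List (List Char)), List.map (String.toList ∘ String.ofList) parts = parts := by
    intro parts
    simp [Function.comp_def, String.toList_ofList]
  rw [h3]
  rw [pvGo_join (address.toList.length + 1) address.toList [] (by omega)]
  simp
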